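-- pv_equiv track=rewrite | github.com/vaibkumr/prompt-optimizer | prompt_optimizer/poptim/utils.py | parse_protect_tags
-- ===== SOURCE A (Python) =====
-- from typing import Any, Callable, List, Tuple
--
-- class ParseError(Exception):
--     """
--     ParseError is a custom exception class raised when a parsing error occurs.
--     It inherits from the built-in Exception class.
--
--     Attributes:
--         message (str): The error message describing the parsing error.
--         prompt (str): The prompt where the parsing error occurred.
--     """
--
--     def __init__(self, message: str, prompt: str) -> None:
--         """
--         Initialize a new ParseError instance.
--
--         Args:
--             message (str): The error message describing the parsing error.
--             prompt (str): The prompt where the parsing error occurred.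
--
--         Returns:
--             None
--         """
--         super().__init__(message)
--         self.prompt = prompt
--
--     def __str__(self) -> str:
--         """
--         Return a string representation of the ParseError instance.
--
--         Returns:
--             str: A formatted string representing the ParseError instance.
--                  Example: "ParseError: <message> in `Prompt`: <prompt>"
--         """
--         return f"ParseError: {self.args[0]} in `Prompt`: {self.prompt}"
--
-- def parse_protect_tags(prompt: str, protect_tag: str) -> Tuple[List[str], List[str]]:
--     """
--     Parse the given prompt and extract protected chunks enclosed by protect tags.
--
--     Args:
--         prompt (str): The prompt string to parse.
--         protect_tag (str): The protect tag used to enclose the protected chunks.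
--
--     Returns:
--         Tuple[List[str], List[str]]: A tuple containing two lists.
--             - The first list contains the chunks of the prompt that are not protected.
--             - The second list contains the protected chunks extracted from the prompt.
--
--     Raises:
--         ParseError: If there are nested protect tags, an unclosed protect tag, or invalid protect tag sequences.
--     """
--     protect_start_tag = f"<{protect_tag}>"
--     protect_end_tag = f"</{protect_tag}>"
--
--     chunks = []
--     protected_chunks = []
--
--     stack = []
--     start_idx = 0
--
--     for i in range(len(prompt)):
--         if prompt[i : i + len(protect_start_tag)] == protect_start_tag:
--             if len(stack) != 0:  # nested ignore tags make no sense
--                 raise ParseError("Nested ignore tags not allowed", prompt)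
--
--             stack.append(i)
--             chunks.append(prompt[start_idx:i])
--
--         elif prompt[i : i + len(protect_end_tag)] == protect_end_tag:
--             start_idx = i + len(protect_end_tag)
--             if len(stack) == 0:
--                 raise ParseError(
--                     f"Invalid protect tag sequence. {protect_end_tag} must follow an unclosed {protect_start_tag}",
--                     prompt,
--                 )
--
--             protect_start_index = stack.pop()
--             protect_content = prompt[protect_start_index + len(protect_start_tag) : i]
--             protected_chunks.append(protect_content)
--
--             if protect_content.startswith(
--                 protect_start_tag
--             ) or protect_content.endswith(protect_end_tag):
--                 raise ParseError("Invalid protect tag sequence.", prompt)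
--
--     if len(stack) > 0:
--         raise ParseError(
--             f"All {protect_start_tag} must be followed by a corresponding {protect_end_tag}",
--             prompt,
--         )
--
--     chunks.append(prompt[start_idx:])
--     assert (
--         len(chunks) == len(protected_chunks) + 1
--     ), f"Invalid tag parsing for string: {prompt}"
--
--     return chunks, protected_chunks
-- ===== SOURCE B (Python) =====
-- from typing import List, Tuple
--
--
-- class ParseError(Exception):
--     def __init__(self, message: str, prompt: str) -> None:
--         super().__init__(message)
--         self.prompt = prompt
--
--     def __str__(self) -> str:
--         return f"ParseError: {self.args[0]} in `Prompt`: {self.prompt}"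
--
--
-- def parse_protect_tags(prompt: str, protect_tag: str) -> Tuple[List[str], List[str]]:
--     protect_start_tag = f"<{protect_tag}>"
--     protect_end_tag = f"</{protect_tag}>"
--
--     chunks: List[str] = []
--     protected_chunks: List[str] = []
--
--     open_idx = None  # position of the currently open start tag, if any
--     start_idx = 0    # start of the current unprotected chunk
--     pos = 0          # scan position: jump with str.find instead of testing every index
--     n = len(prompt)
--
--     while pos < n:
--         s = prompt.find(protect_start_tag, pos)
--         e = prompt.find(protect_end_tag, pos)
--         if s == -1 and e == -1:
--             break
--         if s != -1 and (e == -1 or s <= e):  # next tag occurrence is a start tag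
--             if open_idx is not None:
--                 raise ParseError("Nested ignore tags not allowed", prompt)
--             chunks.append(prompt[start_idx:s])
--             open_idx = s
--             pos = s + 1
--         else:  # next tag occurrence is an end tag
--             if open_idx is None:
--                 raise ParseError(
--                     f"Invalid protect tag sequence. {protect_end_tag} must follow an unclosed {protect_start_tag}",
--                     prompt,
--                 )
--             protected_chunks.append(prompt[open_idx + len(protect_start_tag):e])
--             open_idx = None
--             start_idx = e + len(protect_end_tag)
--             pos = e + 1
--
--     if open_idx is not None:
--         raise ParseError(
--             f"All {protect_start_tag} must be followed by a corresponding {protect_end_tag}",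
--             prompt,
--         )
--
--     chunks.append(prompt[start_idx:])
--     return chunks, protected_chunks
-- ===== Notes on version B (the rewrite author's own statement) =====
-- stated objective: faster
-- what changed: Instead of testing a slice against both tags at every index of the prompt, B jumps with str.find to the next occurrence of the start/end tag and processes only those event positions, keeping an open-tag marker instead of a stack.
import Mathlib
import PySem

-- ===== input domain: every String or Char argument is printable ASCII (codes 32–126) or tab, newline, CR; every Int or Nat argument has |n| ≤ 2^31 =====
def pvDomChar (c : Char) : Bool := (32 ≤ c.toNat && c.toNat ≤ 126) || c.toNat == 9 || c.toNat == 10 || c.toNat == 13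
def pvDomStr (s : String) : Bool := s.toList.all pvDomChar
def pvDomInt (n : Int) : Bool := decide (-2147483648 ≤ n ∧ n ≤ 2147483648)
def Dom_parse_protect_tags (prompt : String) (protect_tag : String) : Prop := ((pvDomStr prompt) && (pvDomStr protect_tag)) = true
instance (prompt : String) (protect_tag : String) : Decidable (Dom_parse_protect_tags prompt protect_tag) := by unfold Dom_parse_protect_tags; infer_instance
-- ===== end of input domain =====

-- B replaces A's per-index slice comparison against both tags with str.find jumps to the
-- next tag occurrence (objective: faster).


-- tag construction, shared by both ports: f"<{t}>" and f"</{t}>"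
def pvStartTag (t : List Char) : List Char := '<' :: (t ++ ['>'])
def pvEndTag (t : List Char) : List Char := '<' :: '/' :: (t ++ ['>'])

-- ===== PORT A =====
-- A's loop state: (stack, chunks, protected_chunks, start_idx); exceptions (ParseError /
-- AssertionError) are modelled as .error () of an Except, propagated through the fold.
-- The Python stack appends/pops at the same end; the port pushes/pops at the head.
def pvAStep (p st en : List Char)
    (acc : Except Unit (List Nat × List (List Char) × List (List Char) × Nat)) (i : Nat) :
    Except Unit (List Nat × List (List Char) × List (List Char) × Nat) :=
  match acc with
  | .error e => .error e
  | .ok (stack, chunks, prot, sidx) =>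
    if PySem.List.slice p (some (i : Int)) (some ((i : Int) + (st.length : Int))) = st then
      if stack ≠ [] then .error ()  -- raise ParseError "Nested ignore tags not allowed"
      else .ok (i :: stack,
                chunks ++ [PySem.List.slice p (some (sidx : Int)) (some (i : Int))], prot, sidx)
    else if PySem.List.slice p (some (i : Int)) (some ((i : Int) + (en.length : Int))) = en then
      match stack with
      | [] => .error ()  -- raise ParseError "Invalid protect tag sequence. ..."
      | ps :: rest =>
        let content := PySem.List.slice p (some ((ps : Int) + (st.length : Int))) (some (i : Int))
        if PySem.Chars.startswith content st || PySem.Chars.endswith content en then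
          .error ()  -- raise ParseError "Invalid protect tag sequence."
        else .ok (rest, chunks, prot ++ [content], i + en.length)
    else .ok (stack, chunks, prot, sidx)

-- the code after A's for-loop: unclosed-tag check, final chunk, assert
def pvAFinish (p : List Char)
    (r : Except Unit (List Nat × List (List Char) × List (List Char) × Nat)) :
    Except Unit (List (List Char) × List (List Char)) :=
  match r with
  | .error e => .error e
  | .ok (stack, chunks, prot, sidx) =>
    if stack.length > 0 then .error ()  -- raise ParseError "All <tag> must be followed ..."
    else
      let chunks := chunks ++ [PySem.List.slice p (some (sidx : Int)) none]
      if chunks.length = prot.length + 1 then .ok (chunks, prot) else .error ()  -- assert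

def parse_protect_tags (prompt : String) (protect_tag : String) : List String × List String :=
  let p := prompt.toList
  let st := pvStartTag protect_tag.toList
  let en := pvEndTag protect_tag.toList
  match pvAFinish p ((List.range p.length).foldl (pvAStep p st en) (.ok ([], [], [], 0))) with
  | .ok (c, pr) => (c.map String.ofList, pr.map String.ofList)
  | .error _ => ([], [])  -- unreachable under Pre_: A raises here

-- ===== PORT B =====
-- the code after B's while-loop (also reached by `break`)
def pvBFinish (p : List Char) (sidx : Nat) (openIdx : Option Nat)
    (chunks prot : List (List Char)) : Except Unit (List (List Char) × List (List Char)) :=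
  match openIdx with
  | some _ => .error ()  -- raise ParseError "All <tag> must be followed ..."
  | none => .ok (chunks ++ [PySem.List.slice p (some (sidx : Int)) none], prot)

-- B's while-loop: jump with find to the next start/end-tag occurrence
def pvBLoop (p st en : List Char) (pos sidx : Nat) (openIdx : Option Nat)
    (chunks prot : List (List Char)) : Except Unit (List (List Char) × List (List Char)) :=
  -- s := prompt.find(start_tag, pos); e := prompt.find(end_tag, pos), written inline
  if hlt : pos < p.length then
    if hbr : PySem.Chars.findFrom p st (pos : Int) none = -1
        ∧ PySem.Chars.findFrom p en (pos : Int) none = -1 then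
      pvBFinish p sidx openIdx chunks prot  -- break
    else if hs : PySem.Chars.findFrom p st (pos : Int) none ≠ -1
        ∧ (PySem.Chars.findFrom p en (pos : Int) none = -1
           ∨ PySem.Chars.findFrom p st (pos : Int) none
               ≤ PySem.Chars.findFrom p en (pos : Int) none) then
      -- next occurrence is a start tag
      match openIdx with
      | some _ => .error ()  -- raise ParseError "Nested ignore tags not allowed"
      | none =>
        pvBLoop p st en ((PySem.Chars.findFrom p st (pos : Int) none).toNat + 1) sidx
          (some (PySem.Chars.findFrom p st (pos : Int) none).toNat)
          (chunks ++ [PySem.List.slice p (some (sidx : Int))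
            (some (PySem.Chars.findFrom p st (pos : Int) none))]) prot
    else  -- next occurrence is an end tag
      match openIdx with
      | none => .error ()  -- raise ParseError "Invalid protect tag sequence. ..."
      | some oi =>
        pvBLoop p st en ((PySem.Chars.findFrom p en (pos : Int) none).toNat + 1)
          ((PySem.Chars.findFrom p en (pos : Int) none).toNat + en.length) none chunks
          (prot ++ [PySem.List.slice p (some ((oi : Int) + (st.length : Int)))
            (some (PySem.Chars.findFrom p en (pos : Int) none))])
  else pvBFinish p sidx openIdx chunks prot
termination_by p.length - pos
decreasing_by
  · have h := (PySem.Chars.findFrom_natCast_spec p st pos (le_of_lt hlt) hs.1).1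
    omega
  · have he : PySem.Chars.findFrom p en (pos : Int) none ≠ -1 := by
      intro h0
      rcases Decidable.em (PySem.Chars.findFrom p st (pos : Int) none = -1) with h1 | h1
      · exact hbr ⟨h1, h0⟩
      · exact hs ⟨h1, Or.inl h0⟩
    have h := (PySem.Chars.findFrom_natCast_spec p en pos (le_of_lt hlt) he).1
    omega

def parse_protect_tags_alt (prompt : String) (protect_tag : String) : List String × List String :=
  let p := prompt.toList
  let st := pvStartTag protect_tag.toList
  let en := pvEndTag protect_tag.toList
  match pvBLoop p st en 0 0 none [] [] with
  | .ok (c, pr) => (c.map String.ofList, pr.map String.ofList)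
  | .error _ => ([], [])  -- unreachable under Pre_: B raises here

-- ===== PRECONDITION & SPEC =====
-- the start/end-tag occurrences of the prompt, in order (start checked first, as in A)
def pvEvents (p st en : List Char) : List Bool :=
  (List.range p.length).filterMap (fun i =>
    if st <+: p.drop i then some true
    else if en <+: p.drop i then some false
    else none)

-- expects start,end,start,end,…: complete non-nested pairs
def pvAlt : Bool → List Bool → Bool
  | false, [] => true
  | false, b :: r => b && pvAlt true r
  | true, [] => false
  | true, b :: r => !b && pvAlt false r

-- Pre_ excludes exactly the inputs on which A raises ParseError: prompts whose start/end-tag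
-- occurrences are not properly alternating complete pairs.
def Pre_parse_protect_tags (prompt : String) (protect_tag : String) : Prop :=
  pvAlt false (pvEvents prompt.toList (pvStartTag protect_tag.toList)
    (pvEndTag protect_tag.toList)) = true
instance (prompt : String) (protect_tag : String) :
    Decidable (Pre_parse_protect_tags prompt protect_tag) := by
  unfold Pre_parse_protect_tags; infer_instance

def pvWitness_parse_protect_tags : String × String := ("a<t>b</t>c", "t")

def Spec_parse_protect_tags (prompt : String) (protect_tag : String)
    (out : List String × List String) : Prop := out = parse_protect_tags_alt prompt protect_tag
instance (prompt : String) (protect_tag : String) (out : List String × List String) :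
    Decidable (Spec_parse_protect_tags prompt protect_tag out) := by
  unfold Spec_parse_protect_tags; infer_instance

-- ===== CLAIM (what is proved, stated in full; the proofs are below) =====
def Claim_equal_parse_protect_tags : Prop := ∀ (prompt : String) (protect_tag : String), Dom_parse_protect_tags prompt protect_tag → Pre_parse_protect_tags prompt protect_tag → Spec_parse_protect_tags prompt protect_tag (parse_protect_tags prompt protect_tag)

-- ===== LEMMAS AND PROOFS =====

-- the stack A maintains when driven by B's open-tag marker
def pvStackOf : Option Nat → List Nat
  | none => []
  | some j => [j]

lemma pvMatchIff (p tag : List Char) (i : Nat) :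
    (PySem.List.slice p (some (i : Int)) (some ((i : Int) + (tag.length : Int))) = tag)
      ↔ tag <+: p.drop i := by
  rw [PySem.List.slice_natCast_add, List.prefix_iff_eq_take, eq_comm]

lemma pvErrFold (p st en : List Char) (l : List Nat) :
    l.foldl (pvAStep p st en) (.error ()) = .error () := by
  induction l with
  | nil => rfl
  | cons a l ih => simpa [pvAStep] using ih

lemma pvIdFold (p st en : List Char) :
    ∀ (len pos : Nat) (state : List Nat × List (List Char) × List (List Char) × Nat),
    (∀ i, pos ≤ i → i < pos + len → ¬ st <+: p.drop i ∧ ¬ en <+: p.drop i) →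
    (List.range' pos len).foldl (pvAStep p st en) (.ok state) = .ok state := by
  intro len
  induction len with
  | zero => intro pos state _; rfl
  | succ m ih =>
    intro pos state h
    obtain ⟨stack, chunks, prot, sidx⟩ := state
    have h0 := h pos (le_refl _) (by omega)
    rw [List.range'_succ, List.foldl_cons]
    have hstep : pvAStep p st en (.ok (stack, chunks, prot, sidx)) pos
        = .ok (stack, chunks, prot, sidx) := by
      simp only [pvAStep]
      rw [if_neg (fun hc => h0.1 ((pvMatchIff p st pos).mp hc)),
          if_neg (fun hc => h0.2 ((pvMatchIff p en pos).mp hc))]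
    rw [hstep]
    exact ih (pos + 1) _ (fun i h1 h2 => h i (by omega) (by omega))

lemma pvFinishEq (p : List Char) (openIdx : Option Nat) (chunks prot : List (List Char))
    (sidx : Nat) (hinv : chunks.length = prot.length + (pvStackOf openIdx).length) :
    pvAFinish p (.ok (pvStackOf openIdx, chunks, prot, sidx))
      = pvBFinish p sidx openIdx chunks prot := by
  cases openIdx with
  | none =>
    simp only [pvStackOf, List.length_nil, Nat.add_zero] at hinv
    simp [pvAFinish, pvBFinish, pvStackOf, hinv]
  | some j => simp [pvAFinish, pvBFinish, pvStackOf]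

lemma pvPrefixDropInfix (tag p : List Char) (pos i : Nat) (h : pos ≤ i)
    (hpre : tag <+: p.drop i) : tag <:+: p.drop pos := by
  have hd : p.drop i = (p.drop pos).drop (i - pos) := by rw [List.drop_drop]; congr 1; omega
  rw [hd] at hpre
  obtain ⟨t, ht⟩ := hpre
  obtain ⟨u, hu⟩ := List.drop_suffix (i - pos) (p.drop pos)
  exact ⟨u, t, by rw [List.append_assoc, ht, hu]⟩

lemma pvFindNone (p tag : List Char) (pos : Nat) (hpos : pos ≤ p.length)
    (h : PySem.Chars.findFrom p tag (pos : Int) none = -1) :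
    ∀ i, pos ≤ i → ¬ tag <+: p.drop i := by
  intro i hi hpre
  exact (PySem.Chars.findFrom_natCast_eq_neg_one_iff p tag pos hpos).mp h
    (pvPrefixDropInfix tag p pos i hi hpre)

lemma pvMain (p st en : List Char) (hst : st ≠ []) (hen : en ≠ []) :
    ∀ (k pos : Nat) (openIdx : Option Nat) (chunks prot : List (List Char)) (sidx : Nat),
    pos ≤ p.length → k = p.length - pos →
    (∀ ps, openIdx = some ps → pos = ps + 1) →
    chunks.length = prot.length + (pvStackOf openIdx).length →
    pvAFinish p ((List.range' pos k).foldl (pvAStep p st en)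
        (.ok (pvStackOf openIdx, chunks, prot, sidx)))
      = pvBLoop p st en pos sidx openIdx chunks prot := by
  intro k
  induction k using Nat.strong_induction_on with
  | _ k IH =>
  intro pos openIdx chunks prot sidx hpos hk hopen hinv
  by_cases hlt : pos < p.length
  · have hps : pos ≤ p.length := le_of_lt hlt
    rw [pvBLoop.eq_def, dif_pos hlt]
    by_cases hbr : PySem.Chars.findFrom p st (pos : Int) none = -1
        ∧ PySem.Chars.findFrom p en (pos : Int) none = -1
    · rw [dif_pos hbr]
      rw [pvIdFold p st en k pos _ (fun i hi _ =>
        ⟨pvFindNone p st pos hps hbr.1 i hi, pvFindNone p en pos hps hbr.2 i hi⟩)]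
      exact pvFinishEq p openIdx chunks prot sidx hinv
    · rw [dif_neg hbr]
      by_cases hs : PySem.Chars.findFrom p st (pos : Int) none ≠ -1
          ∧ (PySem.Chars.findFrom p en (pos : Int) none = -1
             ∨ PySem.Chars.findFrom p st (pos : Int) none
                 ≤ PySem.Chars.findFrom p en (pos : Int) none)
      · -- next event is a start tag at j
        rw [dif_pos hs]
        obtain ⟨hge, hpre, hmin⟩ := PySem.Chars.findFrom_natCast_spec p st pos hps hs.1
        have h0s : (0 : Int) ≤ PySem.Chars.findFrom p st (pos : Int) none := by
          have : (0 : Int) ≤ (pos : Int) := by positivity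
          omega
        generalize hjdef : (PySem.Chars.findFrom p st (pos : Int) none).toNat = j at *
        have hj : (PySem.Chars.findFrom p st (pos : Int) none) = (j : Int) := by omega
        have hjpos : pos ≤ j := by omega
        have hjn : j < p.length := by
          by_contra hc
          rw [List.drop_eq_nil_of_le (by omega)] at hpre
          exact hst (List.prefix_nil.mp hpre)
        -- no event strictly before j
        have hnoev : ∀ i, pos ≤ i → i < j →
            ¬ st <+: p.drop i ∧ ¬ en <+: p.drop i := by
          intro i hi hilt
          refine ⟨hmin i hi hilt, ?_⟩
          rcases hs.2 with he1 | hle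
          · exact pvFindNone p en pos hps he1 i hi
          · have hene : PySem.Chars.findFrom p en (pos : Int) none ≠ -1 := by omega
            obtain ⟨_, _, hmine⟩ := PySem.Chars.findFrom_natCast_spec p en pos hps hene
            exact hmine i hi (by omega)
        -- split A's loop at j
        have hsplit : List.range' pos k
            = List.range' pos (j - pos) ++ j :: List.range' (j + 1) (p.length - (j + 1)) := by
          have h1 := List.range'_append_1 (s := pos) (m := j - pos) (n := k - (j - pos))
          rw [show (j - pos) + (k - (j - pos)) = k from by omega,
              show pos + (j - pos) = j from by omega,
              show k - (j - pos) = (p.length - (j + 1)) + 1 from by omega,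
              List.range'_succ] at h1
          exact h1.symm
        rw [hsplit, List.foldl_append,
            pvIdFold p st en (j - pos) pos _ (fun i hi h2 => hnoev i hi (by omega)),
            List.foldl_cons]
        -- A's step at j: a start-tag match
        cases openIdx with
        | some ps =>
          have hstep : pvAStep p st en (.ok (pvStackOf (some ps), chunks, prot, sidx)) j
              = .error () := by
            simp only [pvAStep, pvStackOf]
            rw [if_pos ((pvMatchIff p st j).mpr hpre)]
            simp
          rw [hstep, pvErrFold]
          rfl
        | none =>
          have hstep : pvAStep p st en (.ok (pvStackOf none, chunks, prot, sidx)) j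
              = .ok ([j], chunks ++ [PySem.List.slice p (some (sidx : Int)) (some (j : Int))],
                     prot, sidx) := by
            simp only [pvAStep, pvStackOf]
            rw [if_pos ((pvMatchIff p st j).mpr hpre)]
            simp
          rw [hstep, hj]
          exact IH (p.length - (j + 1)) (by omega) (j + 1) (some j) _ prot sidx
            (by omega) (by omega) (by intro ps h; cases h; rfl)
            (by simp [pvStackOf, hinv])
      · -- next event is an end tag at j
        rw [dif_neg hs]
        have hene : PySem.Chars.findFrom p en (pos : Int) none ≠ -1 := by tauto
        obtain ⟨hge, hpre, hmin⟩ := PySem.Chars.findFrom_natCast_spec p en pos hps hene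
        have h0e : (0 : Int) ≤ PySem.Chars.findFrom p en (pos : Int) none := by
          have : (0 : Int) ≤ (pos : Int) := by positivity
          omega
        generalize hjdef : (PySem.Chars.findFrom p en (pos : Int) none).toNat = j at *
        have hj : (PySem.Chars.findFrom p en (pos : Int) none) = (j : Int) := by omega
        have hjpos : pos ≤ j := by omega
        have hjn : j < p.length := by
          by_contra hc
          rw [List.drop_eq_nil_of_le (by omega)] at hpre
          exact hen (List.prefix_nil.mp hpre)
        -- no start-tag match at any i with pos ≤ i ≤ j
        have hnoSt : ∀ i, pos ≤ i → i ≤ j → ¬ st <+: p.drop i := by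
          intro i hi hile
          by_cases hsne : PySem.Chars.findFrom p st (pos : Int) none = -1
          · exact pvFindNone p st pos hps hsne i hi
          · have hlt' : PySem.Chars.findFrom p en (pos : Int) none
                < PySem.Chars.findFrom p st (pos : Int) none := by
              rcases not_and_or.mp hs with h | h
              · exact absurd hsne (by simpa using h)
              · have h2 := not_or.mp h
                omega
            obtain ⟨_, _, hmins⟩ := PySem.Chars.findFrom_natCast_spec p st pos hps hsne
            exact hmins i hi (by omega)
        have hnoev : ∀ i, pos ≤ i → i < j →
            ¬ st <+: p.drop i ∧ ¬ en <+: p.drop i := by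
          intro i hi hilt
          exact ⟨hnoSt i hi (by omega), hmin i hi (by omega)⟩
        have hsplit : List.range' pos k
            = List.range' pos (j - pos) ++ j :: List.range' (j + 1) (p.length - (j + 1)) := by
          have h1 := List.range'_append_1 (s := pos) (m := j - pos) (n := k - (j - pos))
          rw [show (j - pos) + (k - (j - pos)) = k from by omega,
              show pos + (j - pos) = j from by omega,
              show k - (j - pos) = (p.length - (j + 1)) + 1 from by omega,
              List.range'_succ] at h1
          exact h1.symm
        rw [hsplit, List.foldl_append,
            pvIdFold p st en (j - pos) pos _ (fun i hi h2 => hnoev i hi (by omega)),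
            List.foldl_cons]
        cases openIdx with
        | none =>
          have hstep : pvAStep p st en (.ok (pvStackOf none, chunks, prot, sidx)) j
              = .error () := by
            simp only [pvAStep, pvStackOf]
            rw [if_neg (fun hc => hnoSt j hjpos (le_refl _) ((pvMatchIff p st j).mp hc)),
                if_pos ((pvMatchIff p en j).mpr hpre)]
          rw [hstep, pvErrFold]
          rfl
        | some ps =>
          have hpos_ps : pos = ps + 1 := hopen ps rfl
          have hstl : 1 ≤ st.length := by
            cases st with
            | nil => exact absurd rfl hst
            | cons a l => simp
          have henl : 1 ≤ en.length := by
            cases en with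
            | nil => exact absurd rfl hen
            | cons a l => simp
          -- the content slice, as drop/take
          have hcast : ((ps : Int) + (st.length : Int)) = (((ps + st.length : Nat)) : Int) := by
            push_cast; ring
          have hcont : PySem.List.slice p (some ((ps : Int) + (st.length : Int))) (some (j : Int))
              = (p.drop (ps + st.length)).take (j - (ps + st.length)) := by
            rw [hcast, PySem.List.slice_natCast]
          have hcontpre : PySem.List.slice p (some ((ps : Int) + (st.length : Int)))
              (some (j : Int)) <+: p.drop (ps + st.length) := by
            rw [hcont]; exact List.take_prefix _ _
          have hcontlen : (PySem.List.slice p (some ((ps : Int) + (st.length : Int)))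
              (some (j : Int))).length ≤ j - (ps + st.length) := by
            rw [hcont, List.length_take]; omega
          have hnostart : PySem.Chars.startswith
              (PySem.List.slice p (some ((ps : Int) + (st.length : Int))) (some (j : Int))) st
                = false := by
            by_contra hc
            have hsw : st <+: PySem.List.slice p (some ((ps : Int) + (st.length : Int)))
                (some (j : Int)) := (PySem.Chars.startswith_iff _ _).mp (by
              cases hb : PySem.Chars.startswith (PySem.List.slice p
                (some ((ps : Int) + (st.length : Int))) (some (j : Int))) st
              · exact absurd hb hc
              · rfl)
            have hm : st <+: p.drop (ps + st.length) := hsw.trans hcontpre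
            have hlen := hsw.length_le
            exact hnoSt (ps + st.length) (by omega) (by omega) hm
          have hnoend : PySem.Chars.endswith
              (PySem.List.slice p (some ((ps : Int) + (st.length : Int))) (some (j : Int))) en
                = false := by
            by_contra hc
            have hew : en <:+ PySem.List.slice p (some ((ps : Int) + (st.length : Int)))
                (some (j : Int)) := (PySem.Chars.endswith_iff _ _).mp (by
              cases hb : PySem.Chars.endswith (PySem.List.slice p
                (some ((ps : Int) + (st.length : Int))) (some (j : Int))) en
              · exact absurd hb hc
              · rfl)
            obtain ⟨u, hu⟩ := hew
            have hlen : u.length + en.length ≤ j - (ps + st.length) := by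
              have := hcontlen
              rw [← hu, List.length_append] at this
              omega
            have hm : en <+: p.drop (ps + st.length + u.length) := by
              have h1 := hcontpre.drop u.length
              rwa [← hu, List.drop_left, List.drop_drop] at h1
            exact hmin (ps + st.length + u.length) (by omega) (by omega) hm
          have hstep : pvAStep p st en (.ok (pvStackOf (some ps), chunks, prot, sidx)) j
              = .ok ([], chunks,
                     prot ++ [PySem.List.slice p (some ((ps : Int) + (st.length : Int)))
                       (some (j : Int))], j + en.length) := by
            simp only [pvAStep, pvStackOf]
            rw [if_neg (fun hc => hnoSt j hjpos (le_refl _) ((pvMatchIff p st j).mp hc)),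
                if_pos ((pvMatchIff p en j).mpr hpre)]
            simp [hnostart, hnoend]
          rw [hstep, hj]
          exact IH (p.length - (j + 1)) (by omega) (j + 1) none chunks _ (j + en.length)
            (by omega) (by omega) (by intro ps' h; cases h)
            (by simp [pvStackOf] at hinv ⊢; omega)
  · have hk0 : k = 0 := by omega
    subst hk0
    rw [pvBLoop.eq_def, dif_neg hlt]
    exact pvFinishEq p openIdx chunks prot sidx hinv

lemma pvRunEq (prompt protect_tag : String) :
    parse_protect_tags prompt protect_tag = parse_protect_tags_alt prompt protect_tag := by
  have h := pvMain prompt.toList (pvStartTag protect_tag.toList) (pvEndTag protect_tag.toList)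
    (by simp [pvStartTag]) (by simp [pvEndTag])
    prompt.toList.length 0 none [] [] 0 (by omega) (by omega)
    (by intro ps h; cases h) rfl
  simp only [pvStackOf] at h
  simp only [parse_protect_tags, parse_protect_tags_alt, List.range_eq_range']
  rw [h]

-- ===== VERDICT (by name: the statement is the Claim_ definition above) =====
theorem parse_protect_tags_spec : Claim_equal_parse_protect_tags := by
  intro prompt protect_tag _ _
  unfold Spec_parse_protect_tags
  exact pvRunEq prompt protect_tag
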